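-- pv_equiv track=rewrite | github.com/need-singularity/sylvian-singularity | math/verify_hmp8_hmp10.py | compute_arithmetic_arrays
-- ===== SOURCE A (Python) =====
-- def compute_arithmetic_arrays(N):
--     """Sieve-based computation of sigma, phi, tau for 1..N"""
--     sig = [0] * (N + 1)
--     ph = list(range(N + 1))
--     ta = [0] * (N + 1)
--
--     # sigma: sum of divisors
--     for i in range(1, N + 1):
--         for j in range(i, N + 1, i):
--             sig[j] += i
--
--     # phi: Euler totient via sieve
--     for i in range(2, N + 1):
--         if ph[i] == i:  # i is prime
--             for j in range(i, N + 1, i):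
--                 ph[j] -= ph[j] // i
--
--     # tau: number of divisors
--     for i in range(1, N + 1):
--         for j in range(i, N + 1, i):
--             ta[j] += 1
--
--     return sig, ph, ta
-- ===== SOURCE B (Python) =====
-- def compute_arithmetic_arrays(N):
--     """sigma, phi, tau for 1..N from prime factorizations: one factor sieve collecting the
--     distinct prime divisors of every n, then each entry built multiplicatively per row."""
--     pfs = [[] for _ in range(N + 1)]
--     for p in range(2, N + 1):
--         if not pfs[p]:  # no smaller prime divides p, so p is prime
--             for j in range(p, N + 1, p):
--                 pfs[j].append(p)
--
--     sig = [0] * (N + 1)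
--     ph = [0] * (N + 1)
--     ta = [0] * (N + 1)
--     for n in range(1, N + 1):
--         s = 1
--         t = 1
--         r = n
--         m = n
--         for p in pfs[n]:
--             e = 0
--             while m % p == 0:
--                 m //= p
--                 e += 1
--             term = 0
--             pe = 1
--             for _ in range(e + 1):
--                 term += pe
--                 pe *= p
--             s *= term
--             t *= e + 1
--             r -= r // p
--         sig[n] = s
--         ph[n] = r
--         ta[n] = t
--     return sig, ph, ta
-- ===== Notes on version B (the rewrite author's own statement) =====
-- stated objective: alternative
-- what changed: A fills the three arrays by per-divisor/per-prime column sieves (adding i to sig/ta at every multiple, and reducing ph at multiples of primes detected by ph[i]==i); B instead runs one factor sieve collecting each n's distinct prime divisors and then builds every entry row-wise from its prime factorization (geometric sums for sigma, e+1 factors for tau, r -= r//p for phi).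
import Mathlib
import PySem

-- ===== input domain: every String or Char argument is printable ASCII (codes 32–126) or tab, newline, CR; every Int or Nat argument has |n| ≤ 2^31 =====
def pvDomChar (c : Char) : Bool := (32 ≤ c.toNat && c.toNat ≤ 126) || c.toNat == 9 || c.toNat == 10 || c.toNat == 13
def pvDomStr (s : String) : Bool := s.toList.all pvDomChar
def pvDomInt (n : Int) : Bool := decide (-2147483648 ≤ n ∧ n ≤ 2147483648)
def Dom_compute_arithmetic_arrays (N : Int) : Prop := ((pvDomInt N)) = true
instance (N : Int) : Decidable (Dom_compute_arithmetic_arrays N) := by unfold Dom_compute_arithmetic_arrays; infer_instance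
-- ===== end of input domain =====

-- B replaces A's column-wise sieves (divisor/prime passes updating every multiple, primes
-- detected by ph[i]==i) with a factor sieve collecting each n's distinct prime divisors,
-- every entry then built row-wise from the prime factorization (geometric sums for sigma,
-- e+1 factors for tau, r -= r//p for phi). Alternative algorithm of the same cost class;
-- return values proved equal for every N.


-- ===== PORT A =====
-- the three sieve passes of A, named for readability; each is the literal loop nest of A
def pvASig (N : Int) (s0 : List Int) : List Int :=
  (PySem.List.pyRange 1 (N + 1) 1).foldl (fun s i =>
    (PySem.List.pyRange i (N + 1) i).foldl (fun s j =>
      PySem.List.pySetD s j (PySem.List.pyGetD s j 0 + i)) s) s0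

def pvAPhi (N : Int) (p0 : List Int) : List Int :=
  (PySem.List.pyRange 2 (N + 1) 1).foldl (fun p i =>
    if PySem.List.pyGetD p i 0 = i then
      (PySem.List.pyRange i (N + 1) i).foldl (fun p j =>
        PySem.List.pySetD p j (PySem.List.pyGetD p j 0 -
          PySem.Int.floordiv (PySem.List.pyGetD p j 0) i)) p
    else p) p0

def pvATau (N : Int) (t0 : List Int) : List Int :=
  (PySem.List.pyRange 1 (N + 1) 1).foldl (fun t i =>
    (PySem.List.pyRange i (N + 1) i).foldl (fun t j =>
      PySem.List.pySetD t j (PySem.List.pyGetD t j 0 + 1)) t) t0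

def compute_arithmetic_arrays (N : Int) : List Int × List Int × List Int :=
  (pvASig N (List.replicate (N + 1).toNat 0),
   pvAPhi N (PySem.List.pyRange 0 (N + 1) 1),
   pvATau N (List.replicate (N + 1).toNat 0))

-- ===== PORT B =====
-- pfs[j] collects the distinct prime divisors of j in increasing order ("factor sieve")
def pvBSieve (N : Int) : List (List Int) :=
  (PySem.List.pyRange 2 (N + 1) 1).foldl (fun a p =>
    if PySem.List.pyGetD a p [] = ([] : List Int) then
      (PySem.List.pyRange p (N + 1) p).foldl (fun a j =>
        PySem.List.pySetD a j (PySem.List.pyGetD a j [] ++ [p])) a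
    else a) (List.replicate (N + 1).toNat [])

-- the 'while m % p == 0: m //= p; e += 1' loop; fuel bounds the trip count and is
-- never exhausted on the reachable inputs (2 ≤ p, 1 ≤ m ≤ fuel)
def pvExpLoop : Nat → Int → Int → Nat × Int
  | 0, m, _ => (0, m)
  | fuel + 1, m, p =>
      if PySem.Int.mod m p = 0 then
        ((pvExpLoop fuel (PySem.Int.floordiv m p) p).1 + 1,
         (pvExpLoop fuel (PySem.Int.floordiv m p) p).2)
      else (0, m)

-- the 'for _ in range(e + 1): term += pe; pe *= p' loop, state (term, pe)
def pvGeom (e : Nat) (p : Int) : Int × Int :=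
  (PySem.List.pyRange 0 ((e : Int) + 1) 1).foldl (fun tp _ => (tp.1 + tp.2, tp.2 * p)) (0, 1)

-- one iteration of B's row loop, state (s, t, r, m)
def pvRowStep : (Int × Int × Int × Int) → Int → (Int × Int × Int × Int) := fun st p =>
  (st.1 * (pvGeom (pvExpLoop st.2.2.2.toNat st.2.2.2 p).1 p).1,
   st.2.1 * (((pvExpLoop st.2.2.2.toNat st.2.2.2 p).1 : Int) + 1),
   st.2.2.1 - PySem.Int.floordiv st.2.2.1 p,
   (pvExpLoop st.2.2.2.toNat st.2.2.2 p).2)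

def pvRow (n : Int) (ps : List Int) : Int × Int × Int :=
  ((ps.foldl pvRowStep (1, 1, n, n)).1,
   (ps.foldl pvRowStep (1, 1, n, n)).2.2.1,
   (ps.foldl pvRowStep (1, 1, n, n)).2.1)

def compute_arithmetic_arrays_alt (N : Int) : List Int × List Int × List Int :=
  (PySem.List.pyRange 1 (N + 1) 1).foldl
    (fun (acc : List Int × List Int × List Int) n =>
      (PySem.List.pySetD acc.1 n (pvRow n (PySem.List.pyGetD (pvBSieve N) n [])).1,
       PySem.List.pySetD acc.2.1 n (pvRow n (PySem.List.pyGetD (pvBSieve N) n [])).2.1,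
       PySem.List.pySetD acc.2.2 n (pvRow n (PySem.List.pyGetD (pvBSieve N) n [])).2.2))
    (List.replicate (N + 1).toNat 0, List.replicate (N + 1).toNat 0,
     List.replicate (N + 1).toNat 0)

-- ===== PRECONDITION & SPEC =====
def Spec_compute_arithmetic_arrays (N : Int) (out : List Int × List Int × List Int) : Prop := out = compute_arithmetic_arrays_alt N
instance (N : Int) (out : List Int × List Int × List Int) : Decidable (Spec_compute_arithmetic_arrays N out) := by unfold Spec_compute_arithmetic_arrays; infer_instance

-- ===== CLAIM (what is proved, stated in full; the proofs are below) =====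
def Claim_equal_compute_arithmetic_arrays : Prop := ∀ (N : Int), Dom_compute_arithmetic_arrays N → Spec_compute_arithmetic_arrays N (compute_arithmetic_arrays N)

-- ===== LEMMAS AND PROOFS =====

-- row-level reference semantics both final results are proved equal to
def pvIsPrimeB (p : Int) : Bool :=
  (PySem.List.pyRange 2 p 1).all (fun d => PySem.Int.mod p d != 0)

def pvSigRow (n : Int) : Int :=
  (PySem.List.pyRange 1 (n + 1) 1).foldl
    (fun s d => if PySem.Int.mod n d = 0 then s + d else s) 0

def pvTauRow (n : Int) : Int :=
  (PySem.List.pyRange 1 (n + 1) 1).foldl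
    (fun t d => if PySem.Int.mod n d = 0 then t + 1 else t) 0

def pvPhiRow (n : Int) : Int :=
  (PySem.List.pyRange 2 (n + 1) 1).foldl
    (fun r p => if PySem.Int.mod n p = 0 ∧ pvIsPrimeB p = true then
        r - PySem.Int.floordiv r p else r) n


theorem pvFoldSet_length {α : Type} (g : List α → Int → α) :
    ∀ (l : List Int) (s : List α),
      (l.foldl (fun s j => PySem.List.pySetD s j (g s j)) s).length = s.length := by
  intro l
  induction l with
  | nil => intro s; rfl
  | cons j t ih =>
      intro s
      simp only [List.foldl_cons]
      rw [ih]
      exact PySem.List.length_pySetD _ _ _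

theorem pvNodup_pyRange_pos (a b s : Int) (hs : 0 < s) : (PySem.List.pyRange a b s).Nodup := by
  rw [PySem.List.pyRange_of_pos a b hs]
  refine (List.nodup_range).map ?_
  intro x y hxy
  have h2 : s * (x:Int) = s * y := by
    have := add_left_cancel hxy
    linarith
  have := mul_left_cancel₀ (by omega : (s:Int) ≠ 0) h2
  exact_mod_cast this


theorem pvFoldSetG_getD {α : Type} (d : α) (g : Int → α → α) :
    ∀ (l : List Int) (s : List α) (k : Nat), l.Nodup →
      (∀ j ∈ l, 0 ≤ j ∧ j < s.length) →
      (l.foldl (fun s j => PySem.List.pySetD s j (g j (PySem.List.pyGetD s j d))) s).getD k d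
        = if (k:Int) ∈ l then g k (s.getD k d) else s.getD k d := by
  intro l
  induction l with
  | nil => intro s k _ _; simp
  | cons j t ih =>
      intro s k hnd hrange
      obtain ⟨hj0, hjlen⟩ := hrange j (by simp)
      have hjlt : j.toNat < s.length := by omega
      have hvj : PySem.List.pyGetD s j d = s.getD j.toNat d := by
        rw [PySem.List.pyGetD_eq_getElem s d hj0 hjlen, List.getD_eq_getElem s d hjlt]
      have hset : PySem.List.pySetD s j (g j (PySem.List.pyGetD s j d))
          = s.set j.toNat (g j (s.getD j.toNat d)) := by
        rw [PySem.List.pySetD_of_nonneg s _ hj0, hvj]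
      simp only [List.foldl_cons]
      rw [hset]
      rw [ih _ k (List.Nodup.of_cons hnd)
        (by intro x hx
            have := hrange x (List.mem_cons_of_mem _ hx)
            simpa [List.length_set] using this)]
      have hgetset : ∀ (m : Nat), (s.set j.toNat (g j (s.getD j.toNat d))).getD m d
          = if m = j.toNat then g j (s.getD m d) else s.getD m d := by
        intro m
        by_cases hm : m = j.toNat
        · subst hm
          rw [List.getD_eq_getElem?_getD, List.getElem?_set, if_pos rfl, if_pos hjlt,
            if_pos rfl]
          rfl
        · rw [List.getD_eq_getElem?_getD, List.getElem?_set,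
            if_neg (fun h => hm h.symm), if_neg hm, ← List.getD_eq_getElem?_getD]
      rw [hgetset k]
      have hmemc : ((k:Int) ∈ j :: t) = ((k:Int) = j ∨ (k:Int) ∈ t) := by
        simp [List.mem_cons]
      by_cases hk : (k:Int) ∈ t
      · have hkj : ¬ (k = j.toNat) := by
          intro h
          exact (List.nodup_cons.mp hnd).1 (by rw [show j = ((k:Nat):Int) by omega]; exact hk)
        rw [if_pos hk, if_neg hkj, if_pos (List.mem_cons_of_mem _ hk)]
      · by_cases hkj : (k:Int) = j
        · rw [if_neg hk, if_pos (by omega : k = j.toNat),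
            if_pos (by rw [hmemc]; exact Or.inl hkj)]
          rw [show j = (k:Int) from hkj.symm]
        · rw [if_neg hk, if_neg (by omega : ¬ (k = j.toNat)),
            if_neg (by rw [hmemc]; rintro (h | h) <;> [exact hkj h; exact hk h])]

theorem pvFoldSet_getD (f : Int → Int) :
    ∀ (l : List Int) (s : List Int) (k : Nat), l.Nodup →
      (∀ j ∈ l, 0 ≤ j ∧ j < s.length) →
      (l.foldl (fun s j => PySem.List.pySetD s j (f (PySem.List.pyGetD s j 0))) s).getD k 0
        = if (k:Int) ∈ l then f (s.getD k 0) else s.getD k 0 :=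
  fun l s k hnd hr => pvFoldSetG_getD 0 (fun _ v => f v) l s k hnd hr

theorem pvSievePass_getD (f : Int → Int → Int) (M : Int) :
    ∀ (l : List Int) (s : List Int) (k : Nat),
      (∀ i ∈ l, 1 ≤ i) → ((s.length : Int) = M) → k < s.length →
      (l.foldl (fun s i => (PySem.List.pyRange i M i).foldl
          (fun s j => PySem.List.pySetD s j (f i (PySem.List.pyGetD s j 0))) s) s).getD k 0
        = l.foldl (fun v i => if (k:Int) ∈ PySem.List.pyRange i M i then f i v else v)
            (s.getD k 0) := by
  intro l
  induction l with
  | nil => intro s k _ _ _; rfl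
  | cons i t ih =>
      intro s k hl hM hk
      have hi : 1 ≤ i := hl i (by simp)
      simp only [List.foldl_cons]
      have hlen1 : ((PySem.List.pyRange i M i).foldl
          (fun s j => PySem.List.pySetD s j (f i (PySem.List.pyGetD s j 0))) s).length
          = s.length := pvFoldSet_length _ _ _
      rw [ih _ k (fun x hx => hl x (List.mem_cons_of_mem _ hx)) (by rw [hlen1]; exact hM)
        (by omega)]
      rw [pvFoldSet_getD (f i) _ s k (pvNodup_pyRange_pos _ _ _ (by omega))
        (by intro j hj
            have := (PySem.List.mem_pyRange_iff_of_pos (by omega : (0:Int) < i) j).mp hj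
            exact ⟨by omega, by omega⟩)]


-- membership of k in A's inner multiples range is plain divisibility (bounded k)
theorem pvMemMultiples (N i k : Int) (hi : 1 ≤ i) (_hk0 : 0 ≤ k) (hk : k < N + 1) :
    (k ∈ PySem.List.pyRange i (N + 1) i) ↔ (i ∣ k ∧ i ≤ k) := by
  rw [PySem.List.mem_pyRange_iff_of_pos (by omega : (0:Int) < i)]
  constructor
  · rintro ⟨h1, _, h3⟩
    refine ⟨?_, h1⟩
    have := dvd_add h3 (dvd_refl i)
    simpa using this
  · rintro ⟨h1, h2⟩
    exact ⟨h2, hk, dvd_sub h1 (dvd_refl i)⟩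

-- a guarded fold whose guard is false on every element is the identity
theorem pvFoldl_id {α : Type} (C : α → Prop) [DecidablePred C] (g : Int → α → Int)
    (l : List α) (v : Int) (h : ∀ x ∈ l, ¬ C x) :
    l.foldl (fun v x => if C x then g v x else v) v = v := by
  rw [PySem.List.foldl_congr_mem l _ (fun v _ => v) v
    (by intro acc x hx; rw [if_neg (h x hx)])]
  exact List.foldl_fixed l

-- A's column condition over [1..N] collapses to B's row scan over [1..k]
theorem pvCondFold_eq (N : Int) (k : Nat) (hk : (k:Int) < N + 1) (g : Int → Int → Int) :
    (PySem.List.pyRange 1 (N + 1) 1).foldl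
      (fun v i => if (k:Int) ∈ PySem.List.pyRange i (N + 1) i then g i v else v) 0
    = (PySem.List.pyRange 1 ((k:Int) + 1) 1).foldl
      (fun v i => if PySem.Int.mod (k:Int) i = 0 then g i v else v) 0 := by
  rw [PySem.List.pyRange_one_append 1 ((k:Int)+1) (N+1) (by omega) (by omega),
    List.foldl_append]
  have htail : ∀ x ∈ PySem.List.pyRange ((k:Int)+1) (N+1) 1,
      ¬ ((k:Int) ∈ PySem.List.pyRange x (N+1) x) := by
    intro x hx
    have hx' := (PySem.List.mem_pyRange_one).mp hx
    rw [pvMemMultiples N x k (by omega) (by omega) hk]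
    rintro ⟨_, h2⟩
    omega
  rw [pvFoldl_id _ _ _ _ htail]
  refine PySem.List.foldl_congr_mem _ _ _ _ ?_
  intro acc i hi
  have hi' := (PySem.List.mem_pyRange_one).mp hi
  have hmem := pvMemMultiples N i k (by omega) (by omega) hk
  have hmod := PySem.Int.mod_eq_zero_iff_dvd (k:Int) i
  by_cases hd : i ∣ (k:Int)
  · rw [if_pos (hmem.mpr ⟨hd, by omega⟩), if_pos (hmod.mpr hd)]
  · rw [if_neg (fun hm => hd (hmem.mp hm).1), if_neg (fun hm => hd (hmod.mp hm))]

def pvPhiStep (n : Int) : Int → Int → Int := fun r p =>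
  if PySem.Int.mod n p = 0 ∧ pvIsPrimeB p = true then r - PySem.Int.floordiv r p else r

def pvG (k : Int) (c : Int) : Int := (PySem.List.pyRange 2 c 1).foldl (pvPhiStep k) k

theorem pvIsPrimeB_iff (p : Int) :
    pvIsPrimeB p = true ↔ ∀ e : Int, 2 ≤ e → e < p → ¬ e ∣ p := by
  unfold pvIsPrimeB
  rw [List.all_eq_true]
  constructor
  · intro h e h2 hlt hdvd
    have := h e ((PySem.List.mem_pyRange_one).mpr ⟨h2, hlt⟩)
    simp only [bne_iff_ne, ne_eq] at this
    exact this ((PySem.Int.mod_eq_zero_iff_dvd p e).mpr hdvd)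
  · intro h d hd
    have hd' := (PySem.List.mem_pyRange_one).mp hd
    simp only [bne_iff_ne, ne_eq]
    intro hmod
    exact h d hd'.1 hd'.2 ((PySem.Int.mod_eq_zero_iff_dvd p d).mp hmod)

theorem pvPhiFold_bounds (n : Int) :
    ∀ (l : List Int) (r : Int), (∀ p ∈ l, 2 ≤ p) → 0 ≤ r →
      0 ≤ l.foldl (pvPhiStep n) r ∧ l.foldl (pvPhiStep n) r ≤ r := by
  intro l
  induction l with
  | nil => intro r _ hr; exact ⟨hr, le_refl r⟩
  | cons p t ih =>
      intro r hl hr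
      have hp : 2 ≤ p := hl p (by simp)
      have hstep : 0 ≤ pvPhiStep n r p ∧ pvPhiStep n r p ≤ r := by
        unfold pvPhiStep
        split_ifs with h
        · rw [PySem.Int.floordiv_eq_ediv_of_pos (by omega)]
          have h1 : 0 ≤ r / p := Int.ediv_nonneg hr (by omega)
          have h2 : r / p ≤ r := Int.ediv_le_self p hr
          omega
        · omega
      simp only [List.foldl_cons]
      have := ih (pvPhiStep n r p) (fun x hx => hl x (List.mem_cons_of_mem _ hx)) hstep.1
      exact ⟨this.1, le_trans this.2 hstep.2⟩

theorem pvG_zero (c : Int) : pvG 0 c = 0 := by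
  unfold pvG
  have : ∀ (l : List Int), (∀ p ∈ l, 0 < p) → l.foldl (pvPhiStep 0) 0 = 0 := by
    intro l
    induction l with
    | nil => intro _; rfl
    | cons p t ih =>
        intro hl
        have hp : 0 < p := hl p (by simp)
        simp only [List.foldl_cons]
        have hstep : pvPhiStep 0 0 p = 0 := by
          unfold pvPhiStep
          split_ifs with h
          · rw [PySem.Int.floordiv_eq_ediv_of_pos hp]
            simp
          · rfl
        rw [hstep]
        exact ih (fun x hx => hl x (List.mem_cons_of_mem _ hx))
  refine this _ ?_
  intro p hp
  have := (PySem.List.mem_pyRange_one).mp hp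
  omega

-- every divisor e (2 ≤ e ∣ i) yields a trial-division-prime divisor p ≤ e of i
theorem pvExistsPrimeDiv :
    ∀ (fuel : Nat) (e i : Int), e.toNat ≤ fuel → 2 ≤ e → e ∣ i →
      ∃ p : Int, 2 ≤ p ∧ p ≤ e ∧ p ∣ i ∧ pvIsPrimeB p = true := by
  intro fuel
  induction fuel with
  | zero => intro e i hf h2 _; omega
  | succ m ih =>
      intro e i hf h2 hdvd
      by_cases hp : pvIsPrimeB e = true
      · exact ⟨e, h2, le_refl e, hdvd, hp⟩
      · have := (not_iff_not.mpr (pvIsPrimeB_iff e)).mp hp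
        push Not at this
        obtain ⟨q, hq2, hqlt, hqdvd⟩ := this
        obtain ⟨p, hp2, hple, hpdvd, hpprime⟩ :=
          ih q i (by omega) hq2 (dvd_trans hqdvd hdvd)
        exact ⟨p, hp2, by omega, hpdvd, hpprime⟩

-- least trial-division-prime divisor of i, below i, when i is composite
theorem pvLeastPrimeDiv (i e : Int) (h2 : 2 ≤ e) (hlt : e < i) (hdvd : e ∣ i) :
    ∃ p : Int, 2 ≤ p ∧ p < i ∧ p ∣ i ∧ pvIsPrimeB p = true ∧
      ∀ q : Int, 2 ≤ q → q < p → ¬ (q ∣ i ∧ pvIsPrimeB q = true) := by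
  obtain ⟨p0, hp02, hp0le, hp0dvd, hp0prime⟩ := pvExistsPrimeDiv e.toNat e i (le_refl _) h2 hdvd
  have hQ : ∃ n : Nat, 2 ≤ (n:Int) ∧ (n:Int) ∣ i ∧ pvIsPrimeB (n:Int) = true :=
    ⟨p0.toNat, by omega, by rw [show ((p0.toNat:Nat):Int) = p0 by omega]; exact hp0dvd,
      by rw [show ((p0.toNat:Nat):Int) = p0 by omega]; exact hp0prime⟩
  classical
  let n := Nat.find hQ
  obtain ⟨hn2, hndvd, hnprime⟩ := Nat.find_spec hQ
  refine ⟨(n:Int), hn2, ?_, hndvd, hnprime, ?_⟩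
  · have : n ≤ p0.toNat := Nat.find_le ⟨by omega,
      by rw [show ((p0.toNat:Nat):Int) = p0 by omega]; exact hp0dvd,
      by rw [show ((p0.toNat:Nat):Int) = p0 by omega]; exact hp0prime⟩
    omega
  · intro q hq2 hqlt ⟨hqdvd, hqprime⟩
    have : ¬ (2 ≤ ((q.toNat:Nat):Int) ∧ ((q.toNat:Nat):Int) ∣ i ∧ pvIsPrimeB ((q.toNat:Nat):Int) = true) :=
      Nat.find_min hQ (by omega)
    rw [show ((q.toNat:Nat):Int) = q by omega] at this
    exact this ⟨hq2, hqdvd, hqprime⟩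

-- A's in-array prime test ph[i]==i coincides with trial-division primality
theorem pvDetect (i : Int) (h2 : 2 ≤ i) : (pvG i i = i) ↔ pvIsPrimeB i = true := by
  constructor
  · intro hG
    by_contra hp
    have := (not_iff_not.mpr (pvIsPrimeB_iff i)).mp hp
    push Not at this
    obtain ⟨e, he2, helt, hedvd⟩ := this
    obtain ⟨p, hp2, hplt, hpdvd, hpprime, hpmin⟩ := pvLeastPrimeDiv i e he2 helt hedvd
    have hsplit : PySem.List.pyRange 2 i 1
        = PySem.List.pyRange 2 p 1 ++ p :: PySem.List.pyRange (p+1) i 1 := by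
      rw [PySem.List.pyRange_one_append 2 p i (by omega) (by omega),
        PySem.List.pyRange_one_cons (by omega : p < i)]
    have hpre : (PySem.List.pyRange 2 p 1).foldl (pvPhiStep i) i = i := by
      rw [PySem.List.foldl_congr_mem _ _ (fun r _ => r) i
        (by intro acc q hq
            have hq' := (PySem.List.mem_pyRange_one).mp hq
            unfold pvPhiStep
            rw [if_neg]
            rintro ⟨hmod, hqprime⟩
            exact hpmin q hq'.1 hq'.2
              ⟨(PySem.Int.mod_eq_zero_iff_dvd i q).mp hmod, hqprime⟩)]
      exact List.foldl_fixed _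
    have hstep : pvPhiStep i i p = i - i / p := by
      unfold pvPhiStep
      rw [if_pos ⟨(PySem.Int.mod_eq_zero_iff_dvd i p).mpr hpdvd, hpprime⟩,
        PySem.Int.floordiv_eq_ediv_of_pos (by omega)]
    have hdiv1 : 1 ≤ i / p := by
      rw [Int.le_ediv_iff_mul_le (by omega : (0:Int) < p)]
      omega
    have hdivle : i / p ≤ i := Int.ediv_le_self p (by omega)
    have hrest := pvPhiFold_bounds i (PySem.List.pyRange (p+1) i 1) (i - i / p)
      (by intro x hx
          have := (PySem.List.mem_pyRange_one).mp hx
          omega)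
      (by omega)
    have hGval : pvG i i ≤ i - 1 := by
      unfold pvG
      rw [hsplit, List.foldl_append, hpre, List.foldl_cons, hstep]
      omega
    omega
  · intro hp
    unfold pvG
    have hnone : ∀ q ∈ PySem.List.pyRange 2 i 1,
        ¬ (PySem.Int.mod i q = 0 ∧ pvIsPrimeB q = true) := by
      intro q hq ⟨hmod, _⟩
      have hq' := (PySem.List.mem_pyRange_one).mp hq
      exact (pvIsPrimeB_iff i).mp hp q hq'.1 hq'.2
        ((PySem.Int.mod_eq_zero_iff_dvd i q).mp hmod)
    rw [PySem.List.foldl_congr_mem _ _ (fun r _ => r) i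
      (by intro acc q hq; unfold pvPhiStep; rw [if_neg (hnone q hq)])]
    exact List.foldl_fixed _

theorem pvPhiStep_zero (n p : Int) (hp : 0 < p) : pvPhiStep n 0 p = 0 := by
  unfold pvPhiStep
  split_ifs with h
  · rw [PySem.Int.floordiv_eq_ediv_of_pos hp]
    simp
  · rfl

theorem pvGsucc (k c : Int) (h2 : 2 ≤ c) : pvG k (c + 1) = pvPhiStep k (pvG k c) c := by
  unfold pvG
  rw [PySem.List.pyRange_one_succ_right (by omega : (2:Int) ≤ c), List.foldl_append]
  rfl

theorem pvG_stable (k c : Int) (hk : 0 ≤ k) (hc : k + 1 ≤ c) : pvG k c = pvG k (k + 1) := by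
  by_cases hk0 : k = 0
  · subst hk0; rw [pvG_zero, pvG_zero]
  · unfold pvG
    rw [PySem.List.pyRange_one_append 2 (k+1) c (by omega) hc, List.foldl_append]
    rw [PySem.List.foldl_congr_mem (PySem.List.pyRange (k+1) c 1) _ (fun r _ => r) _
      (by intro acc q hq
          have hq' := (PySem.List.mem_pyRange_one).mp hq
          unfold pvPhiStep
          rw [if_neg]
          rintro ⟨hmod, _⟩
          have hdvd := (PySem.Int.mod_eq_zero_iff_dvd k q).mp hmod
          have := Int.le_of_dvd (by omega) hdvd
          omega)]
    exact List.foldl_fixed _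

-- prefix of A's phi pass, for the loop invariant
def pvAPhiPre (N c : Int) : List Int :=
  (PySem.List.pyRange 2 c 1).foldl (fun p i =>
    if PySem.List.pyGetD p i 0 = i then
      (PySem.List.pyRange i (N + 1) i).foldl (fun p j =>
        PySem.List.pySetD p j (PySem.List.pyGetD p j 0 -
          PySem.Int.floordiv (PySem.List.pyGetD p j 0) i)) p
    else p) (PySem.List.pyRange 0 (N + 1) 1)

theorem pvPhiInv (N : Int) : ∀ (m : Nat), (2 + (m:Int)) ≤ N + 1 →
    (pvAPhiPre N (2 + (m:Int))).length = (N + 1).toNat ∧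
    ∀ (k : Nat), k < (N + 1).toNat →
      (pvAPhiPre N (2 + (m:Int))).getD k 0 = pvG (k:Int) (2 + (m:Int)) := by
  intro m
  induction m with
  | zero =>
      intro _
      have hnil : PySem.List.pyRange 2 (2 + ((0:Nat):Int)) 1 = [] := by
        rw [PySem.List.pyRange_one_eq_nil (by omega)]
      unfold pvAPhiPre
      rw [hnil]
      constructor
      · simp [PySem.List.length_pyRange_one]
      · intro k hk
        simp only [List.foldl_nil]
        rw [List.getD_eq_getElem _ _ (by rw [PySem.List.length_pyRange_one]; omega),
          PySem.List.getElem_pyRange_one]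
        unfold pvG
        rw [PySem.List.pyRange_one_eq_nil (by omega)]
        simp
  | succ m ih =>
      intro hm1
      have hm' : (2 + (m:Int)) ≤ N + 1 := by push_cast at hm1 ⊢; omega
      obtain ⟨ihlen, ihget⟩ := ih hm'
      have hc1 : (2 + ((m+1:Nat):Int)) = (2 + (m:Int)) + 1 := by push_cast; ring
      set c : Int := 2 + (m:Int) with hc
      have hc2 : 2 ≤ c := by omega
      have hcN : c ≤ N := by omega
      have hpref : pvAPhiPre N (c + 1) =
          (if PySem.List.pyGetD (pvAPhiPre N c) c 0 = c then
            (PySem.List.pyRange c (N + 1) c).foldl (fun p j =>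
              PySem.List.pySetD p j (PySem.List.pyGetD p j 0 -
                PySem.Int.floordiv (PySem.List.pyGetD p j 0) c)) (pvAPhiPre N c)
          else pvAPhiPre N c) := by
        unfold pvAPhiPre
        rw [PySem.List.pyRange_one_succ_right (by omega : (2:Int) ≤ c), List.foldl_append]
        rfl
      have hread : PySem.List.pyGetD (pvAPhiPre N c) c 0 = pvG c c := by
        have hlt : c < ((pvAPhiPre N c).length : Int) := by rw [ihlen]; omega
        rw [PySem.List.pyGetD_eq_getElem _ 0 (by omega) hlt,
          ← List.getD_eq_getElem _ 0 (by omega : c.toNat < (pvAPhiPre N c).length)]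
        rw [ihget c.toNat (by omega)]
        congr 1
      rw [hc1]
      by_cases hprime : pvIsPrimeB c = true
      · have hcond : PySem.List.pyGetD (pvAPhiPre N c) c 0 = c := by
          rw [hread]; exact (pvDetect c hc2).mpr hprime
        rw [hpref, if_pos hcond]
        have hlen2 : ((PySem.List.pyRange c (N + 1) c).foldl (fun p j =>
            PySem.List.pySetD p j (PySem.List.pyGetD p j 0 -
              PySem.Int.floordiv (PySem.List.pyGetD p j 0) c)) (pvAPhiPre N c)).length
            = (N + 1).toNat := by
          rw [pvFoldSet_length]; exact ihlen
        refine ⟨hlen2, ?_⟩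
        intro k hk
        rw [pvFoldSet_getD (fun v => v - PySem.Int.floordiv v c) _ _ k
          (pvNodup_pyRange_pos _ _ _ (by omega))
          (by intro j hj
              have := (PySem.List.mem_pyRange_iff_of_pos (by omega : (0:Int) < c) j).mp hj
              refine ⟨by omega, by rw [ihlen]; omega⟩)]
        rw [ihget k hk, pvGsucc _ _ hc2]
        by_cases hk0 : k = 0
        · subst hk0
          rw [if_neg (by
            intro hmem
            have := (PySem.List.mem_pyRange_iff_of_pos (by omega : (0:Int) < c) _).mp hmem
            omega)]
          simp only [Nat.cast_zero]
          rw [pvG_zero, pvPhiStep_zero _ _ (by omega)]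
        · have hkpos : (0:Int) < (k:Int) := by omega
          have hmem := pvMemMultiples N c (k:Int) (by omega) (by omega) (by omega)
          unfold pvPhiStep
          by_cases hdvd : c ∣ (k:Int)
          · rw [if_pos (hmem.mpr ⟨hdvd, Int.le_of_dvd hkpos hdvd⟩),
              if_pos ⟨(PySem.Int.mod_eq_zero_iff_dvd _ _).mpr hdvd, hprime⟩]
          · rw [if_neg (fun h => hdvd (hmem.mp h).1),
              if_neg (fun h => hdvd ((PySem.Int.mod_eq_zero_iff_dvd _ _).mp h.1))]
      · have hcond : ¬ (PySem.List.pyGetD (pvAPhiPre N c) c 0 = c) := by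
          rw [hread]
          intro h
          exact hprime ((pvDetect c hc2).mp h)
        rw [hpref, if_neg hcond]
        refine ⟨ihlen, ?_⟩
        intro k hk
        rw [ihget k hk, pvGsucc _ _ hc2]
        unfold pvPhiStep
        rw [if_neg (fun h => hprime h.2)]


theorem pvSieve_length (f : Int → Int → Int) (M : Int) :
    ∀ (l : List Int) (s : List Int),
      (l.foldl (fun s i => (PySem.List.pyRange i M i).foldl
          (fun s j => PySem.List.pySetD s j (f i (PySem.List.pyGetD s j 0))) s) s).length
        = s.length := by
  intro l
  induction l with
  | nil => intro s; rfl
  | cons i t ih =>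
      intro s
      simp only [List.foldl_cons]
      rw [ih, pvFoldSet_length]

theorem pvSig_eq (N : Int) :
    pvASig N (List.replicate (N + 1).toNat 0)
      = (PySem.List.pyRange 0 (N + 1) 1).map pvSigRow := by
  unfold pvASig
  have hlenA := pvSieve_length (fun i v => v + i) (N + 1)
    (PySem.List.pyRange 1 (N + 1) 1) (List.replicate (N + 1).toNat 0)
  apply List.ext_getElem
  · rw [hlenA, List.length_replicate, List.length_map,
      PySem.List.length_pyRange_one]
    omega
  · intro k h1 h2
    rw [hlenA, List.length_replicate] at h1
    have hN : 0 < N + 1 := by omega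
    rw [← List.getD_eq_getElem _ 0, List.getElem_map, PySem.List.getElem_pyRange_one]
    rw [pvSievePass_getD (fun i v => v + i) (N + 1) (PySem.List.pyRange 1 (N + 1) 1)
      (List.replicate (N + 1).toNat 0) k
      (by intro x hx; exact ((PySem.List.mem_pyRange_one).mp hx).1)
      (by rw [List.length_replicate]; omega)
      (by rw [List.length_replicate]; omega)]
    rw [List.getD_eq_getElem _ 0 (by rw [List.length_replicate]; omega), List.getElem_replicate]
    rw [pvCondFold_eq N k (by omega) (fun i v => v + i)]
    show _ = pvSigRow (0 + (k:Int))
    rw [zero_add]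
    rfl

theorem pvTau_eq (N : Int) :
    pvATau N (List.replicate (N + 1).toNat 0)
      = (PySem.List.pyRange 0 (N + 1) 1).map pvTauRow := by
  unfold pvATau
  have hlenA := pvSieve_length (fun i v => v + 1) (N + 1)
    (PySem.List.pyRange 1 (N + 1) 1) (List.replicate (N + 1).toNat 0)
  apply List.ext_getElem
  · rw [hlenA, List.length_replicate, List.length_map,
      PySem.List.length_pyRange_one]
    omega
  · intro k h1 h2
    rw [hlenA, List.length_replicate] at h1
    have hN : 0 < N + 1 := by omega
    rw [← List.getD_eq_getElem _ 0, List.getElem_map, PySem.List.getElem_pyRange_one]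
    rw [pvSievePass_getD (fun i v => v + 1) (N + 1) (PySem.List.pyRange 1 (N + 1) 1)
      (List.replicate (N + 1).toNat 0) k
      (by intro x hx; exact ((PySem.List.mem_pyRange_one).mp hx).1)
      (by rw [List.length_replicate]; omega)
      (by rw [List.length_replicate]; omega)]
    rw [List.getD_eq_getElem _ 0 (by rw [List.length_replicate]; omega), List.getElem_replicate]
    rw [pvCondFold_eq N k (by omega) (fun i v => v + 1)]
    show _ = pvTauRow (0 + (k:Int))
    rw [zero_add]
    rfl

theorem pvPhiRow_eq_pvG (n : Int) : pvPhiRow n = pvG n (n + 1) := rfl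

theorem pvPhi_eq (N : Int) :
    pvAPhi N (PySem.List.pyRange 0 (N + 1) 1)
      = (PySem.List.pyRange 0 (N + 1) 1).map pvPhiRow := by
  have hpre : pvAPhi N (PySem.List.pyRange 0 (N + 1) 1) = pvAPhiPre N (N + 1) := rfl
  by_cases hN : 1 ≤ N
  · have hm : (2 + (((N - 1).toNat : Nat) : Int)) = N + 1 := by omega
    obtain ⟨hlen, hget⟩ := pvPhiInv N (N - 1).toNat (by omega)
    rw [hm] at hlen hget
    rw [hpre]
    apply List.ext_getElem
    · rw [hlen, List.length_map, PySem.List.length_pyRange_one]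
      omega
    · intro k h1 h2
      rw [hlen] at h1
      rw [← List.getD_eq_getElem _ 0, List.getElem_map, PySem.List.getElem_pyRange_one]
      rw [List.getD_eq_getElem _ 0 (by rw [hlen]; exact h1), ← List.getD_eq_getElem _ 0, hget k h1]
      rw [zero_add, pvPhiRow_eq_pvG]
      exact pvG_stable (k:Int) (N + 1) (by omega) (by omega)
  · have hnil : PySem.List.pyRange 2 (N + 1) 1 = [] :=
      PySem.List.pyRange_one_eq_nil (by omega)
    rw [hpre]
    unfold pvAPhiPre
    rw [hnil]
    simp only [List.foldl_nil]
    apply List.ext_getElem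
    · rw [List.length_map]
    · intro k h1 h2
      rw [PySem.List.length_pyRange_one] at h1
      have hk0 : k = 0 := by omega
      have hN0 : N = 0 := by omega
      subst hk0 hN0
      rw [List.getElem_map, PySem.List.getElem_pyRange_one]
      decide


-- ===== B-side: sieve characterization =====

-- reference: the distinct "trial-division primes" dividing n below c, in increasing order
def pvPF (n c : Int) : List Int :=
  if 1 ≤ n then
    (PySem.List.pyRange 2 c 1).filter
      (fun p => decide (PySem.Int.mod n p = 0 ∧ pvIsPrimeB p = true))
  else []

def pvBSievePre (N c : Int) : List (List Int) :=
  (PySem.List.pyRange 2 c 1).foldl (fun a p =>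
    if PySem.List.pyGetD a p [] = ([] : List Int) then
      (PySem.List.pyRange p (N + 1) p).foldl (fun a j =>
        PySem.List.pySetD a j (PySem.List.pyGetD a j [] ++ [p])) a
    else a) (List.replicate (N + 1).toNat [])

theorem pvPF_self_nil_iff (c : Int) (h2 : 2 ≤ c) :
    (pvPF c c = []) ↔ pvIsPrimeB c = true := by
  unfold pvPF
  rw [if_pos (by omega : (1:Int) ≤ c), List.filter_eq_nil_iff]
  constructor
  · intro h
    rw [pvIsPrimeB_iff]
    intro e he2 helt hedvd
    obtain ⟨p, hp2, hple, hpdvd, hpprime⟩ :=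
      pvExistsPrimeDiv e.toNat e c (le_refl _) he2 hedvd
    refine h p ((PySem.List.mem_pyRange_one).mpr ⟨hp2, by omega⟩) ?_
    simp only [decide_eq_true_eq]
    exact ⟨(PySem.Int.mod_eq_zero_iff_dvd c p).mpr hpdvd, hpprime⟩
  · intro hp q hq
    have hq' := (PySem.List.mem_pyRange_one).mp hq
    simp only [decide_eq_true_eq]
    rintro ⟨hmod, _⟩
    exact (pvIsPrimeB_iff c).mp hp q hq'.1 hq'.2
      ((PySem.Int.mod_eq_zero_iff_dvd c q).mp hmod)

theorem pvPF_succ (k c : Int) (h2 : 2 ≤ c) :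
    pvPF k (c + 1) = pvPF k c ++
      (if 1 ≤ k ∧ PySem.Int.mod k c = 0 ∧ pvIsPrimeB c = true then [c] else []) := by
  unfold pvPF
  by_cases hk : 1 ≤ k
  · rw [if_pos hk, if_pos hk,
      PySem.List.pyRange_one_succ_right (by omega : (2:Int) ≤ c), List.filter_append]
    congr 1
    by_cases hcond : PySem.Int.mod k c = 0 ∧ pvIsPrimeB c = true
    · rw [if_pos ⟨hk, hcond⟩]
      simp [hcond.1, hcond.2]
    · rw [if_neg (by rintro ⟨_, h⟩; exact hcond h)]
      simp only [List.filter_cons, List.filter_nil]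
      rw [if_neg (by simpa using hcond)]
  · rw [if_neg hk, if_neg hk, if_neg (by rintro ⟨h, _⟩; exact hk h)]
    simp

theorem pvBSvInv (N : Int) : ∀ (m : Nat), (2 + (m:Int)) ≤ N + 1 →
    (pvBSievePre N (2 + (m:Int))).length = (N + 1).toNat ∧
    ∀ (k : Nat), k < (N + 1).toNat →
      (pvBSievePre N (2 + (m:Int))).getD k [] = pvPF (k:Int) (2 + (m:Int)) := by
  intro m
  induction m with
  | zero =>
      intro _
      have hnil : PySem.List.pyRange 2 (2 + ((0:Nat):Int)) 1 = [] := by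
        rw [PySem.List.pyRange_one_eq_nil (by omega)]
      unfold pvBSievePre
      rw [hnil]
      constructor
      · simp
      · intro k hk
        simp only [List.foldl_nil]
        rw [List.getD_eq_getElem _ _ (by rw [List.length_replicate]; omega),
          List.getElem_replicate]
        unfold pvPF
        by_cases hk1 : (1:Int) ≤ (k:Int)
        · rw [if_pos hk1, PySem.List.pyRange_one_eq_nil (by omega)]
          rfl
        · rw [if_neg hk1]
  | succ m ih =>
      intro hm1
      have hm' : (2 + (m:Int)) ≤ N + 1 := by push_cast at hm1 ⊢; omega
      obtain ⟨ihlen, ihget⟩ := ih hm'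
      have hc1 : (2 + ((m+1:Nat):Int)) = (2 + (m:Int)) + 1 := by push_cast; ring
      set c : Int := 2 + (m:Int) with hc
      have hc2 : 2 ≤ c := by omega
      have hcN : c ≤ N := by omega
      have hpref : pvBSievePre N (c + 1) =
          (if PySem.List.pyGetD (pvBSievePre N c) c [] = ([] : List Int) then
            (PySem.List.pyRange c (N + 1) c).foldl (fun a j =>
              PySem.List.pySetD a j (PySem.List.pyGetD a j [] ++ [c])) (pvBSievePre N c)
          else pvBSievePre N c) := by
        unfold pvBSievePre
        rw [PySem.List.pyRange_one_succ_right (by omega : (2:Int) ≤ c), List.foldl_append]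
        rfl
      have hread : PySem.List.pyGetD (pvBSievePre N c) c [] = pvPF c c := by
        have hlt : c < ((pvBSievePre N c).length : Int) := by rw [ihlen]; omega
        rw [PySem.List.pyGetD_eq_getElem _ [] (by omega) hlt,
          ← List.getD_eq_getElem _ [] (by omega : c.toNat < (pvBSievePre N c).length)]
        rw [ihget c.toNat (by omega)]
        congr 1
      rw [hc1]
      by_cases hprime : pvIsPrimeB c = true
      · have hcond : PySem.List.pyGetD (pvBSievePre N c) c [] = ([] : List Int) := by
          rw [hread]; exact (pvPF_self_nil_iff c hc2).mpr hprime
        rw [hpref, if_pos hcond]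
        refine ⟨by rw [pvFoldSet_length]; exact ihlen, ?_⟩
        intro k hk
        rw [pvFoldSetG_getD ([] : List Int) (fun _ v => v ++ [c]) _ _ k
          (pvNodup_pyRange_pos _ _ _ (by omega))
          (by intro j hj
              have := (PySem.List.mem_pyRange_iff_of_pos (by omega : (0:Int) < c) j).mp hj
              refine ⟨by omega, by rw [ihlen]; omega⟩)]
        rw [ihget k hk, pvPF_succ _ _ hc2]
        by_cases hk0 : k = 0
        · subst hk0
          rw [if_neg (by
            intro hmem
            have := (PySem.List.mem_pyRange_iff_of_pos (by omega : (0:Int) < c) _).mp hmem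
            omega)]
          rw [if_neg (by rintro ⟨h, _⟩; omega)]
          simp
        · have hkpos : (0:Int) < (k:Int) := by omega
          have hmem := pvMemMultiples N c (k:Int) (by omega) (by omega) (by omega)
          by_cases hdvd : c ∣ (k:Int)
          · rw [if_pos (hmem.mpr ⟨hdvd, Int.le_of_dvd hkpos hdvd⟩),
              if_pos ⟨by omega, (PySem.Int.mod_eq_zero_iff_dvd _ _).mpr hdvd, hprime⟩]
          · rw [if_neg (fun h => hdvd (hmem.mp h).1),
              if_neg (fun h => hdvd ((PySem.Int.mod_eq_zero_iff_dvd _ _).mp h.2.1))]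
            simp
      · have hcond : ¬ (PySem.List.pyGetD (pvBSievePre N c) c [] = ([] : List Int)) := by
          rw [hread]
          intro h
          exact hprime ((pvPF_self_nil_iff c hc2).mp h)
        rw [hpref, if_neg hcond]
        refine ⟨ihlen, ?_⟩
        intro k hk
        rw [ihget k hk, pvPF_succ _ _ hc2,
          if_neg (fun h => hprime h.2.2)]
        simp

theorem pvBSieve_spec (N : Int) :
    (pvBSieve N).length = (N + 1).toNat ∧
    ∀ (k : Nat), k < (N + 1).toNat →
      (pvBSieve N).getD k [] = pvPF (k:Int) (N + 1) := by
  have hpre : pvBSieve N = pvBSievePre N (N + 1) := rfl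
  by_cases hN : 1 ≤ N
  · have hm : (2 + (((N - 1).toNat : Nat) : Int)) = N + 1 := by omega
    obtain ⟨hlen, hget⟩ := pvBSvInv N (N - 1).toNat (by omega)
    rw [hm] at hlen hget
    rw [hpre]
    exact ⟨hlen, hget⟩
  · have hnil : PySem.List.pyRange 2 (N + 1) 1 = [] :=
      PySem.List.pyRange_one_eq_nil (by omega)
    rw [hpre]
    unfold pvBSievePre
    rw [hnil]
    simp only [List.foldl_nil]
    refine ⟨by simp, ?_⟩
    intro k hk
    have hk0 : k = 0 := by omega
    subst hk0
    rw [List.getD_eq_getElem _ _ (by rw [List.length_replicate]; omega),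
      List.getElem_replicate]
    unfold pvPF
    rw [if_neg (by omega)]


-- ===== B-side: row computation =====

theorem pvIsPrimeB_natPrime (p : Int) (h2 : 2 ≤ p) :
    pvIsPrimeB p = true ↔ Nat.Prime p.toNat := by
  rw [pvIsPrimeB_iff, Nat.prime_def_lt]
  constructor
  · intro h
    refine ⟨by omega, ?_⟩
    intro m hm hdvd
    by_contra hne
    have hm0 : m ≠ 0 := by rintro rfl; simp at hdvd; omega
    have hm2 : 2 ≤ m := by omega
    exact h (m:Int) (by omega) (by omega)
      (by have := Int.natCast_dvd_natCast.mpr hdvd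
          rwa [show ((p.toNat:Nat):Int) = p by omega] at this)
  · rintro ⟨_, h⟩ e he2 helt hedvd
    have : e.toNat ∣ p.toNat := by
      rw [← Int.natCast_dvd_natCast, show ((p.toNat:Nat):Int) = p by omega,
        show ((e.toNat:Nat):Int) = e by omega]
      exact hedvd
    have := h e.toNat (by omega) this
    omega

theorem pvExpLoop_spec :
    ∀ (fuel : Nat) (m p : Int), 2 ≤ p → 1 ≤ m → m ≤ (fuel : Int) →
      m = p ^ (pvExpLoop fuel m p).1 * (pvExpLoop fuel m p).2 ∧
      1 ≤ (pvExpLoop fuel m p).2 ∧ ¬ (p ∣ (pvExpLoop fuel m p).2) := by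
  intro fuel
  induction fuel with
  | zero =>
      intro m p hp hm hf
      push_cast at hf
      omega
  | succ f ih =>
      intro m p hp hm hf
      by_cases hdvd : PySem.Int.mod m p = 0
      · have hdvd' : p ∣ m := (PySem.Int.mod_eq_zero_iff_dvd m p).mp hdvd
        have hfd : PySem.Int.floordiv m p = m / p :=
          PySem.Int.floordiv_eq_ediv_of_pos (by omega)
        have hpm : p ≤ m := Int.le_of_dvd (by omega) hdvd'
        have hq1 : 1 ≤ m / p := by
          rw [Int.le_ediv_iff_mul_le (by omega : (0:Int) < p)]
          omega
        have hqf : m / p ≤ (f : Int) := by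
          have h2 : m / p < m := by
            rw [Int.ediv_lt_iff_lt_mul (by omega)]
            nlinarith
          push_cast at hf
          omega
        obtain ⟨ha, hb, hc⟩ := ih (m / p) p hp hq1 (by omega)
        simp only [pvExpLoop, hdvd, if_pos, hfd]
        refine ⟨?_, hb, hc⟩
        have hmp : m = p * (m / p) := (Int.ediv_mul_cancel hdvd').symm.trans (mul_comm _ _)
        calc m = p * (m / p) := hmp
          _ = p * (p ^ (pvExpLoop f (m/p) p).1 * (pvExpLoop f (m/p) p).2) := by rw [← ha]
          _ = p ^ ((pvExpLoop f (m/p) p).1 + 1) * (pvExpLoop f (m/p) p).2 := by ring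
      · simp only [pvExpLoop, hdvd, if_false]
        refine ⟨by ring_nf, hm, ?_⟩
        intro h
        exact hdvd ((PySem.Int.mod_eq_zero_iff_dvd m p).mpr h)

theorem pvGeom_spec (p : Int) :
    ∀ (e : Nat), pvGeom e p = ((∑ j ∈ Finset.range (e + 1), p ^ j), p ^ (e + 1)) := by
  intro e
  induction e with
  | zero =>
      unfold pvGeom
      rw [show ((0:Nat):Int) + 1 = 0 + 1 by ring, PySem.List.pyRange_one_singleton]
      simp
  | succ e ih =>
      unfold pvGeom at ih ⊢
      have : (((e+1:Nat)):Int) + 1 = ((e:Int) + 1) + 1 := by push_cast; ring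
      rw [this, PySem.List.pyRange_one_succ_right (by omega), List.foldl_append, ih]
      simp only [List.foldl_cons, List.foldl_nil]
      rw [Finset.sum_range_succ _ (e+1), Prod.mk.injEq]
      exact ⟨by ring, by ring⟩

theorem pvRowPhi (ps : List Int) :
    ∀ (s t r m : Int), (ps.foldl pvRowStep (s, t, r, m)).2.2.1
      = ps.foldl (fun r p => r - PySem.Int.floordiv r p) r := by
  induction ps with
  | nil => intro s t r m; rfl
  | cons p rest ih =>
      intro s t r m
      simp only [List.foldl_cons]
      exact ih _ _ _ _

-- B's row loop over a complete duplicate-free list of the prime divisors of m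
-- multiplies s by sigma(m) and t by tau(m)
theorem pvRowMul : ∀ (ps : List Int) (mN : Nat) (s t r : Int), 1 ≤ mN → ps.Nodup →
    (∀ p ∈ ps, 2 ≤ p ∧ pvIsPrimeB p = true ∧ p ∣ (mN : Int)) →
    (∀ q : Nat, q.Prime → q ∣ mN → (q : Int) ∈ ps) →
    (ps.foldl pvRowStep (s, t, r, (mN : Int))).1 = s * ((∑ d ∈ mN.divisors, d : Nat) : Int) ∧
    (ps.foldl pvRowStep (s, t, r, (mN : Int))).2.1 = t * ((mN.divisors.card : Nat) : Int) := by
  intro ps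
  induction ps with
  | nil =>
      intro mN s t r hm _ _ hcompl
      have hm1 : mN = 1 := by
        rw [Nat.eq_one_iff_not_exists_prime_dvd]
        intro q hq hdvd
        simpa using hcompl q hq hdvd
      subst hm1
      simp
  | cons p rest ih =>
      intro mN s t r hm hnd hps hcompl
      obtain ⟨hp2, hpB, hpdvd⟩ := hps p (by simp)
      have hpN : Nat.Prime p.toNat := (pvIsPrimeB_natPrime p hp2).mp hpB
      -- the exponent-extraction step
      have hfuel : ((mN : Int)).toNat = mN := by omega
      obtain ⟨hfac, hm'1, hndvd⟩ := pvExpLoop_spec mN (mN : Int) p hp2 (by omega) (by omega)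
      set e : Nat := (pvExpLoop mN (mN : Int) p).1 with he
      set m' : Int := (pvExpLoop mN (mN : Int) p).2 with hm'
      have hm'N : m' = ((m'.toNat : Nat) : Int) := by omega
      set mN' : Nat := m'.toNat with hmN'
      -- Nat form of the factorization
      have hfacN : mN = p.toNat ^ e * mN' := by
        have : ((mN : Nat) : Int) = ((p.toNat ^ e * mN' : Nat) : Int) := by
          push_cast
          rw [show ((p.toNat : Nat) : Int) = p by omega, ← hm'N]
          exact hfac
        exact_mod_cast this
      have hndvdN : ¬ (p.toNat ∣ mN') := by
        intro h
        apply hndvd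
        rw [hm'N]
        have := Int.natCast_dvd_natCast.mpr h
        rwa [show ((p.toNat : Nat) : Int) = p by omega] at this
      -- step of the fold
      have hstep : pvRowStep (s, t, r, (mN : Int)) p
          = (s * (pvGeom e p).1, t * ((e : Int) + 1),
             r - PySem.Int.floordiv r p, m') := by
        simp only [pvRowStep, hfuel, ← he, ← hm']
      simp only [List.foldl_cons, hstep]
      -- IH hypotheses for the reduced number mN'
      have hmN'1 : 1 ≤ mN' := by omega
      have hrest : ∀ q ∈ rest, 2 ≤ q ∧ pvIsPrimeB q = true ∧ q ∣ (mN' : Int) := by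
        intro q hq
        obtain ⟨hq2, hqB, hqdvd⟩ := hps q (List.mem_cons_of_mem _ hq)
        refine ⟨hq2, hqB, ?_⟩
        have hqN : Nat.Prime q.toNat := (pvIsPrimeB_natPrime q hq2).mp hqB
        have hqnep : q ≠ p := by
          intro h
          exact (List.nodup_cons.mp hnd).1 (h ▸ hq)
        have hqdvdN : q.toNat ∣ mN := by
          rw [← Int.natCast_dvd_natCast] at *
          rwa [show ((q.toNat : Nat) : Int) = q by omega]
        have hcop : (q.toNat).Coprime (p.toNat ^ e) := by
          refine Nat.Coprime.pow_right e ?_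
          rw [Nat.coprime_primes hqN hpN]
          omega
        have : q.toNat ∣ mN' := by
          refine hcop.dvd_of_dvd_mul_left ?_
          rwa [← hfacN]
        have := Int.natCast_dvd_natCast.mpr this
        rwa [show ((q.toNat : Nat) : Int) = q by omega] at this
      have hcompl' : ∀ q : Nat, q.Prime → q ∣ mN' → (q : Int) ∈ rest := by
        intro q hq hdvd
        have hdm : q ∣ mN := by
          rw [hfacN]
          exact hdvd.mul_left _
        have := hcompl q hq hdm
        rcases List.mem_cons.mp this with h | h
        · exfalso
          apply hndvdN
          have : q = p.toNat := by omega
          rwa [← this]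
        · exact h
      obtain ⟨ihs, iht⟩ := ih mN' (s * (pvGeom e p).1) (t * ((e : Int) + 1))
        (r - PySem.Int.floordiv r p) hmN'1 (List.Nodup.of_cons hnd) hrest hcompl'
      rw [← hm'N] at ihs iht
      rw [ihs, iht]
      -- multiplicativity of sigma and tau
      have hcop : (p.toNat ^ e).Coprime mN' :=
        Nat.Coprime.pow_left e ((Nat.Prime.coprime_iff_not_dvd hpN).mpr hndvdN)
      have hsig : (∑ d ∈ mN.divisors, d) = (∑ d ∈ (p.toNat ^ e).divisors, d) * (∑ d ∈ mN'.divisors, d) := by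
        rw [hfacN]
        have := (ArithmeticFunction.isMultiplicative_sigma (k := 1)).map_mul_of_coprime hcop
        simpa [ArithmeticFunction.sigma_one_apply] using this
      have htau : (mN.divisors.card) = (p.toNat ^ e).divisors.card * mN'.divisors.card := by
        rw [hfacN]
        have := (ArithmeticFunction.isMultiplicative_sigma (k := 0)).map_mul_of_coprime hcop
        simpa [ArithmeticFunction.sigma_zero_apply] using this
      have hgeom : (pvGeom e p).1 = (((∑ d ∈ (p.toNat ^ e).divisors, d : Nat)) : Int) := by
        rw [pvGeom_spec, Nat.sum_divisors_prime_pow hpN]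
        push_cast
        rw [show ((p.toNat : Nat) : Int) = p by omega]
      have hcard : ((e : Int) + 1) = (((p.toNat ^ e).divisors.card : Nat) : Int) := by
        rw [Nat.divisors_prime_pow hpN, Finset.card_map, Finset.card_range]
        push_cast
        ring
      rw [hsig, htau, hgeom, hcard]
      push_cast
      constructor <;> ring

theorem pvSigRow_divisors (k : Nat) :
    pvSigRow (k : Int) = ((∑ d ∈ k.divisors, d : Nat) : Int) := by
  have key : ∀ (m : Nat),
      (PySem.List.pyRange 1 ((m:Int) + 1) 1).foldl
        (fun v d => if PySem.Int.mod (k:Int) d = 0 then v + d else v) 0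
      = ((∑ d ∈ Finset.filter (· ∣ k) (Finset.Ico 1 (m+1)), d : Nat) : Int) := by
    intro m
    induction m with
    | zero =>
        rw [show ((0:Nat):Int) + 1 = 1 by norm_num, PySem.List.pyRange_one_eq_nil (by omega)]
        simp
    | succ m ih =>
        rw [show ((m+1:Nat):Int) + 1 = ((m:Int) + 1) + 1 by push_cast; ring,
          PySem.List.pyRange_one_succ_right (by omega), List.foldl_append, ih]
        simp only [List.foldl_cons, List.foldl_nil]
        rw [Finset.sum_filter, Finset.sum_filter, Finset.sum_Ico_succ_top (by omega : 1 ≤ m + 1)]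
        have hcond : (PySem.Int.mod (k:Int) ((m:Int)+1) = 0) ↔ ((m+1) ∣ k) := by
          rw [show (m:Int) + 1 = ((m+1:Nat):Int) by push_cast; ring,
            PySem.Int.mod_eq_zero_iff_dvd, Int.natCast_dvd_natCast]
        by_cases hd : (m+1) ∣ k
        · rw [if_pos (hcond.mpr hd), if_pos hd]
          push_cast
          ring
        · rw [if_neg (fun h => hd (hcond.mp h)), if_neg hd]
          push_cast
          ring
  have := key k
  rw [show (Finset.filter (· ∣ k) (Finset.Ico 1 (k+1))) = k.divisors by simp [Nat.divisors]] at this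
  exact this

theorem pvTauRow_divisors (k : Nat) :
    pvTauRow (k : Int) = ((k.divisors.card : Nat) : Int) := by
  have key : ∀ (m : Nat),
      (PySem.List.pyRange 1 ((m:Int) + 1) 1).foldl
        (fun v d => if PySem.Int.mod (k:Int) d = 0 then v + 1 else v) 0
      = (((Finset.filter (· ∣ k) (Finset.Ico 1 (m+1))).card : Nat) : Int) := by
    intro m
    induction m with
    | zero =>
        rw [show ((0:Nat):Int) + 1 = 1 by norm_num, PySem.List.pyRange_one_eq_nil (by omega)]
        simp
    | succ m ih =>
        rw [show ((m+1:Nat):Int) + 1 = ((m:Int) + 1) + 1 by push_cast; ring,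
          PySem.List.pyRange_one_succ_right (by omega), List.foldl_append, ih]
        simp only [List.foldl_cons, List.foldl_nil]
        rw [Finset.card_filter, Finset.card_filter, Finset.sum_Ico_succ_top (by omega : 1 ≤ m + 1)]
        have hcond : (PySem.Int.mod (k:Int) ((m:Int)+1) = 0) ↔ ((m+1) ∣ k) := by
          rw [show (m:Int) + 1 = ((m+1:Nat):Int) by push_cast; ring,
            PySem.Int.mod_eq_zero_iff_dvd, Int.natCast_dvd_natCast]
        by_cases hd : (m+1) ∣ k
        · rw [if_pos (hcond.mpr hd), if_pos hd]
          push_cast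
          ring
        · rw [if_neg (fun h => hd (hcond.mp h)), if_neg hd]
          push_cast
          ring
  have := key k
  rw [show (Finset.filter (· ∣ k) (Finset.Ico 1 (k+1))) = k.divisors by simp [Nat.divisors]] at this
  exact this

-- a guarded fold is the unguarded fold over the filtered list
theorem pvFoldl_filter {β : Type} (C : Int → Prop) [DecidablePred C] (g : β → Int → β) :
    ∀ (l : List Int) (v : β),
      l.foldl (fun v x => if C x then g v x else v) v
        = (l.filter (fun x => decide (C x))).foldl g v := by
  intro l
  induction l with
  | nil => intro v; rfl
  | cons x t ih =>
      intro v
      simp only [List.foldl_cons, List.filter_cons]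
      by_cases hx : C x
      · rw [if_pos hx, if_pos (by simpa using hx)]
        simp only [List.foldl_cons]
        exact ih _
      · rw [if_neg hx, if_neg (by simpa using hx)]
        exact ih _


-- ===== B-side: assembly =====

theorem pvPF_trunc (N : Int) (k : Nat) (hk1 : 1 ≤ k) (hkN : (k:Int) ≤ N) :
    pvPF (k:Int) (N + 1) = pvPF (k:Int) ((k:Int) + 1) := by
  unfold pvPF
  rw [if_pos (by omega : (1:Int) ≤ (k:Int)), if_pos (by omega : (1:Int) ≤ (k:Int)),
    PySem.List.pyRange_one_append 2 ((k:Int)+1) (N+1) (by omega) (by omega),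
    List.filter_append]
  have : (PySem.List.pyRange ((k:Int)+1) (N+1) 1).filter
      (fun p => decide (PySem.Int.mod (k:Int) p = 0 ∧ pvIsPrimeB p = true)) = [] := by
    rw [List.filter_eq_nil_iff]
    intro p hp
    have hp' := (PySem.List.mem_pyRange_one).mp hp
    simp only [decide_eq_true_eq]
    rintro ⟨hmod, _⟩
    have := Int.le_of_dvd (by omega) ((PySem.Int.mod_eq_zero_iff_dvd _ _).mp hmod)
    omega
  rw [this, List.append_nil]

theorem pvRow_spec (N : Int) (k : Nat) (hk1 : 1 ≤ k) (hkN : (k:Int) ≤ N) :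
    pvRow (k:Int) (pvPF (k:Int) (N + 1))
      = (pvSigRow (k:Int), pvPhiRow (k:Int), pvTauRow (k:Int)) := by
  rw [pvPF_trunc N k hk1 hkN]
  have hps : pvPF (k:Int) ((k:Int) + 1)
      = (PySem.List.pyRange 2 ((k:Int) + 1) 1).filter
          (fun p => decide (PySem.Int.mod (k:Int) p = 0 ∧ pvIsPrimeB p = true)) := by
    unfold pvPF
    rw [if_pos (by omega : (1:Int) ≤ (k:Int))]
  have hnodup : (pvPF (k:Int) ((k:Int) + 1)).Nodup := by
    rw [hps]
    exact (PySem.List.nodup_pyRange_one _ _).filter _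
  have hmem : ∀ p ∈ pvPF (k:Int) ((k:Int) + 1),
      2 ≤ p ∧ pvIsPrimeB p = true ∧ p ∣ ((k:Nat) : Int) := by
    intro p hp
    rw [hps, List.mem_filter] at hp
    have h1 := (PySem.List.mem_pyRange_one).mp hp.1
    have h2 := hp.2
    simp only [decide_eq_true_eq] at h2
    exact ⟨h1.1, h2.2, (PySem.Int.mod_eq_zero_iff_dvd _ _).mp h2.1⟩
  have hcompl : ∀ q : Nat, q.Prime → q ∣ k → (q : Int) ∈ pvPF (k:Int) ((k:Int) + 1) := by
    intro q hq hdvd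
    have hq2 := hq.two_le
    have hqk : q ≤ k := Nat.le_of_dvd (by omega) hdvd
    rw [hps, List.mem_filter]
    refine ⟨(PySem.List.mem_pyRange_one).mpr ⟨by omega, by omega⟩, ?_⟩
    simp only [decide_eq_true_eq]
    refine ⟨(PySem.Int.mod_eq_zero_iff_dvd _ _).mpr (Int.natCast_dvd_natCast.mpr hdvd), ?_⟩
    rw [pvIsPrimeB_natPrime _ (by omega)]
    simpa using hq
  obtain ⟨hsig, htau⟩ := pvRowMul (pvPF (k:Int) ((k:Int) + 1)) k 1 1 (k:Int)
    (by omega) hnodup hmem hcompl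
  have hphi : (((pvPF (k:Int) ((k:Int) + 1)).foldl pvRowStep
      (1, 1, (k:Int), ((k:Nat):Int))).2.2.1) = pvPhiRow (k:Int) := by
    rw [pvRowPhi]
    have hG : pvPhiRow (k:Int) = (PySem.List.pyRange 2 ((k:Int) + 1) 1).foldl
        (fun r p => if PySem.Int.mod (k:Int) p = 0 ∧ pvIsPrimeB p = true then
          r - PySem.Int.floordiv r p else r) (k:Int) := rfl
    rw [hG, pvFoldl_filter (fun p => PySem.Int.mod (k:Int) p = 0 ∧ pvIsPrimeB p = true)
      (fun r p => r - PySem.Int.floordiv r p) _ (k:Int), ← hps]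
  unfold pvRow
  rw [Prod.mk.injEq, Prod.mk.injEq]
  refine ⟨?_, ?_, ?_⟩
  · rw [hsig, pvSigRow_divisors]
    ring
  · exact hphi
  · rw [htau, pvTauRow_divisors]
    ring

theorem pvPureSet_getD (v : Int → Int) :
    ∀ (l : List Int) (s : List Int) (k : Nat), l.Nodup →
      (∀ j ∈ l, 0 ≤ j ∧ j < s.length) →
      (l.foldl (fun x n => PySem.List.pySetD x n (v n)) s).getD k 0
        = if (k:Int) ∈ l then v k else s.getD k 0 :=
  fun l s k hnd hr => pvFoldSetG_getD 0 (fun j _ => v j) l s k hnd hr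

theorem pvAltComp (N : Int) (v row : Int → Int) (hrow0 : row 0 = 0)
    (hrowk : ∀ k : Nat, k < (N + 1).toNat → 1 ≤ k → v (k:Int) = row (k:Int)) :
    (PySem.List.pyRange 1 (N + 1) 1).foldl
        (fun x n => PySem.List.pySetD x n (v n)) (List.replicate (N + 1).toNat 0)
      = (PySem.List.pyRange 0 (N + 1) 1).map row := by
  apply List.ext_getElem
  · rw [pvFoldSet_length, List.length_replicate, List.length_map,
      PySem.List.length_pyRange_one]
    omega
  · intro k h1 h2
    rw [pvFoldSet_length, List.length_replicate] at h1
    rw [← List.getD_eq_getElem _ 0, List.getElem_map, PySem.List.getElem_pyRange_one]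
    rw [pvPureSet_getD v _ _ k (PySem.List.nodup_pyRange_one _ _)
      (by intro j hj
          have := (PySem.List.mem_pyRange_one).mp hj
          refine ⟨by omega, by rw [List.length_replicate]; omega⟩)]
    by_cases hk1 : 1 ≤ k
    · rw [if_pos ((PySem.List.mem_pyRange_one).mpr ⟨by omega, by omega⟩), hrowk k h1 hk1]
      simp
    · have hk0 : k = 0 := by omega
      subst hk0
      rw [if_neg (by intro h; have := (PySem.List.mem_pyRange_one).mp h; omega)]
      rw [List.getD_eq_getElem _ 0 (by rw [List.length_replicate]; omega),
        List.getElem_replicate]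
      simp only [Nat.cast_zero, zero_add]
      exact hrow0.symm

theorem pvTripleFold (f g h : Int → Int) :
    ∀ (l : List Int) (a b c : List Int),
    l.foldl (fun (acc : List Int × List Int × List Int) n =>
        (PySem.List.pySetD acc.1 n (f n), PySem.List.pySetD acc.2.1 n (g n),
         PySem.List.pySetD acc.2.2 n (h n))) (a, b, c)
      = (l.foldl (fun x n => PySem.List.pySetD x n (f n)) a,
         l.foldl (fun x n => PySem.List.pySetD x n (g n)) b,
         l.foldl (fun x n => PySem.List.pySetD x n (h n)) c) := by
  intro l
  induction l with
  | nil => intro a b c; rfl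
  | cons n t ih =>
      intro a b c
      simp only [List.foldl_cons]
      exact ih _ _ _

theorem pvAlt_eq (N : Int) :
    compute_arithmetic_arrays_alt N
      = ((PySem.List.pyRange 0 (N + 1) 1).map pvSigRow,
         (PySem.List.pyRange 0 (N + 1) 1).map pvPhiRow,
         (PySem.List.pyRange 0 (N + 1) 1).map pvTauRow) := by
  obtain ⟨hslen, hsget⟩ := pvBSieve_spec N
  have hrow : ∀ (k : Nat), k < (N + 1).toNat → 1 ≤ k →
      pvRow (k:Int) (PySem.List.pyGetD (pvBSieve N) (k:Int) [])
        = (pvSigRow (k:Int), pvPhiRow (k:Int), pvTauRow (k:Int)) := by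
    intro k hk hk1
    have hg : PySem.List.pyGetD (pvBSieve N) (k:Int) [] = pvPF (k:Int) (N + 1) := by
      rw [PySem.List.pyGetD_natCast]
      rw [hsget k hk]
    rw [hg]
    exact pvRow_spec N k hk1 (by omega)
  unfold compute_arithmetic_arrays_alt
  rw [pvTripleFold (fun n => (pvRow n (PySem.List.pyGetD (pvBSieve N) n [])).1)
    (fun n => (pvRow n (PySem.List.pyGetD (pvBSieve N) n [])).2.1)
    (fun n => (pvRow n (PySem.List.pyGetD (pvBSieve N) n [])).2.2)]
  rw [Prod.mk.injEq, Prod.mk.injEq]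
  refine ⟨?_, ?_, ?_⟩
  · exact pvAltComp N _ pvSigRow (by decide)
      (fun k hk hk1 => by rw [hrow k hk hk1])
  · exact pvAltComp N _ pvPhiRow (by decide)
      (fun k hk hk1 => by rw [hrow k hk hk1])
  · exact pvAltComp N _ pvTauRow (by decide)
      (fun k hk hk1 => by rw [hrow k hk hk1])

-- ===== VERDICT (by name: the statement is the Claim_ definition above) =====
theorem compute_arithmetic_arrays_spec : Claim_equal_compute_arithmetic_arrays := by
  intro N _
  unfold Spec_compute_arithmetic_arrays compute_arithmetic_arrays
  rw [pvSig_eq, pvPhi_eq, pvTau_eq, pvAlt_eq]
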